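-- pv_equiv track=rewrite | github.com/Sarkoxed/Crypto-Library | tools/other/combinatorics/partitions/partitions.py | get_sums_of_odds
-- ===== SOURCE A (Python) =====
-- def get_sums_of_odds(n):
--     if n == 0:
--         return []
--     l = []
--     for i in range(n, 0, -2):
--         g = get_sums_of_odds(n - i)
--         if len(g) > 0:
--             for k in g:
--                 l.append(sorted(k + [i], reverse=True))
--         else:
--             l.append([i])
--     return l
-- ===== SOURCE B (Python) =====
-- # Bottom-up dynamic programming: one table of results for the even sub-sums,
-- # each computed exactly once and reused, with an ordered insertion in place of a re-sort.
-- def _insert_desc(k, i):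
--     j = 0
--     while j < len(k) and k[j] >= i:
--         j += 1
--     return k[:j] + [i] + k[j:]
--
-- def _level(m, table):
--     out = []
--     for i in range(m, 0, -2):
--         g = table[m - i]
--         if g:
--             for k in g:
--                 out.append(_insert_desc(k, i))
--         else:
--             out.append([i])
--     return out
--
-- def get_sums_of_odds(n):
--     if n <= 0:
--         return []
--     table = {0: []}
--     for m in range(2, n, 2):
--         table[m] = _level(m, table)
--     return _level(n, table)
-- ===== Notes on version B (the rewrite author's own statement) =====
-- stated objective: alternative
-- what changed: Replaces A's recomputing recursion with bottom-up dynamic programming: a dict of results for the even sub-sums, each computed exactly once and reused, and an ordered insertion in place of re-sorting each extended partition.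
import Mathlib
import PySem

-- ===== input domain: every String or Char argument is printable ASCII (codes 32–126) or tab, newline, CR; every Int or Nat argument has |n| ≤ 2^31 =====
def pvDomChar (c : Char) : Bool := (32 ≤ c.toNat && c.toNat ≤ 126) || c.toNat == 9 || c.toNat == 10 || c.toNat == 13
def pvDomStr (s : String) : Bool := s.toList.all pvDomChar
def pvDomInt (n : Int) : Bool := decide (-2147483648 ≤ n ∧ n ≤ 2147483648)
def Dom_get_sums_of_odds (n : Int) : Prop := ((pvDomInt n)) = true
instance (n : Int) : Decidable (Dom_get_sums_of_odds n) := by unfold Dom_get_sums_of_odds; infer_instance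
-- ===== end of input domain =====

-- B replaces A's recomputing recursion with a bottom-up table of the even sub-results (each computed
-- once) and an ordered insertion instead of a re-sort; the return values are proved equal for every n.

-- membership bound for range(n, 0, -2), used for termination of the port of A
theorem pv_mem_pyRange_neg_two {n x : Int} (hx : x ∈ PySem.List.pyRange n 0 (-2)) :
    0 < x ∧ x ≤ n ∧ 2 ∣ (n - x) := by
  simp only [PySem.List.pyRange] at hx
  norm_num at hx
  rcases hx with ⟨k, hk, rfl⟩
  split at hk
  · constructor
    · omega
    · omega
  · simp at hk

-- ===== PORT A =====
def get_sums_of_odds (n : Int) : List (List Int) :=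
  if n = 0 then []
  else
    (PySem.List.pyRange n 0 (-2)).attach.foldl
      (fun l i =>
        let g := get_sums_of_odds (n - i.1)
        if g.length > 0 then
          g.foldl (fun l2 k => l2 ++ [PySem.List.sorted (k ++ [i.1]) (fun x => x) true]) l
        else l ++ [[i.1]]) []
termination_by n.toNat
decreasing_by
  have h := pv_mem_pyRange_neg_two i.2
  omega

-- ===== PORT B =====
def pvInsertDesc (k : List Int) (i : Int) : List Int :=
  match k with
  | [] => [i]
  | y :: ys => if y ≥ i then y :: pvInsertDesc ys i else i :: y :: ys

def pvLevel (m : Int) (table : PySem.Dict Int (List (List Int))) : List (List Int) :=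
  (PySem.List.pyRange m 0 (-2)).foldl
    (fun out i =>
      let g := table.getD (m - i) []   -- table[m - i]: the key is always present on B's call sites
      if g.length > 0 then
        g.foldl (fun out2 k => out2 ++ [pvInsertDesc k i]) out
      else out ++ [[i]]) []

def get_sums_of_odds_alt (n : Int) : List (List Int) :=
  if n ≤ 0 then []
  else
    let table := (PySem.List.pyRange 2 n 2).foldl
      (fun t m => t.insert m (pvLevel m t)) (PySem.Dict.insert PySem.Dict.empty 0 [])
    pvLevel n table

-- ===== PRECONDITION & SPEC =====
def Spec_get_sums_of_odds (n : Int) (out : List (List Int)) : Prop := out = get_sums_of_odds_alt n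
instance (n : Int) (out : List (List Int)) : Decidable (Spec_get_sums_of_odds n out) := by unfold Spec_get_sums_of_odds; infer_instance

-- ===== CLAIM (what is proved, stated in full; the proofs are below) =====
def Claim_equal_get_sums_of_odds : Prop := ∀ (n : Int), Dom_get_sums_of_odds n → Spec_get_sums_of_odds n (get_sums_of_odds n)

-- ===== LEMMAS AND PROOFS =====

theorem pv_pyRange_nonpos {n : Int} (hn : n ≤ 0) : PySem.List.pyRange n 0 (-2) = [] := by
  simp only [PySem.List.pyRange]
  norm_num
  omega

-- one unfolding of A as a flatMap over range(n, 0, -2)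
def pvStepA (n i : Int) : List (List Int) :=
  let g := get_sums_of_odds (n - i)
  if g.length > 0 then g.map (fun k => PySem.List.sorted (k ++ [i]) (fun x => x) true)
  else [[i]]

theorem pv_A_flatMap (n : Int) (hn : n ≠ 0) :
    get_sums_of_odds n = (PySem.List.pyRange n 0 (-2)).flatMap (pvStepA n) := by
  rw [get_sums_of_odds, if_neg hn,
      List.foldl_attach (f := fun l i =>
        let g := get_sums_of_odds (n - i)
        if g.length > 0 then
          g.foldl (fun l2 k => l2 ++ [PySem.List.sorted (k ++ [i]) (fun x => x) true]) l
        else l ++ [[i]])]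
  rw [PySem.List.foldl_congr_mem _ _ (fun l i => l ++ pvStepA n i) [] ?_]
  · rw [PySem.List.foldl_append_eq_flatMap]
    simp
  · intro acc i _
    simp only [pvStepA]
    split
    · rw [PySem.List.foldl_append_singleton_eq_map]
    · rfl

theorem pv_mem_A_pairwise {n : Int} {k : List Int} (hk : k ∈ get_sums_of_odds n) :
    k.Pairwise (fun a b => b ≤ a) := by
  by_cases hn : n = 0
  · subst hn
    rw [get_sums_of_odds] at hk
    simp at hk
  · rw [pv_A_flatMap n hn] at hk
    rcases List.mem_flatMap.1 hk with ⟨i, _, hki⟩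
    simp only [pvStepA] at hki
    split at hki
    · rcases List.mem_map.1 hki with ⟨k', _, rfl⟩
      exact PySem.List.sorted_pairwise_rev (k' ++ [i]) (fun x => x)
    · simp at hki
      subst hki
      exact List.pairwise_singleton _ _

theorem pv_insertBy_eq (k : List Int) (i : Int) :
    pvInsertDesc k i = PySem.List.insertBy (fun a b => decide (b < a)) i k := by
  induction k with
  | nil => rfl
  | cons y ys ih =>
    by_cases h : y ≥ i
    · rw [pvInsertDesc, if_pos h, PySem.List.insertBy, if_neg (by simpa using not_lt.2 h), ih]
    · rw [pvInsertDesc, if_neg h, PySem.List.insertBy, if_pos (by simpa using lt_of_not_ge h)]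

theorem pv_insert_sorted {k : List Int} (i : Int) (hs : k.Pairwise (fun a b => b ≤ a)) :
    pvInsertDesc k i = PySem.List.sorted (k ++ [i]) (fun x => x) true := by
  rw [PySem.List.sorted_rev_eq_foldl_insertBy, List.foldl_append,
      ← PySem.List.sorted_rev_eq_foldl_insertBy k (fun x => x),
      PySem.List.sorted_rev_eq_self_of_pairwise k (fun x => x) hs]
  exact (pv_insertBy_eq k i).symm ▸ rfl

-- one level of B as a flatMap over range(m, 0, -2)
def pvStepB (m : Int) (table : PySem.Dict Int (List (List Int))) (i : Int) : List (List Int) :=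
  let g := table.getD (m - i) []
  if g.length > 0 then g.map (fun k => pvInsertDesc k i) else [[i]]

theorem pv_level_flatMap (m : Int) (table : PySem.Dict Int (List (List Int))) :
    pvLevel m table = (PySem.List.pyRange m 0 (-2)).flatMap (pvStepB m table) := by
  rw [pvLevel]
  rw [PySem.List.foldl_congr_mem _ _ (fun out i => out ++ pvStepB m table i) [] ?_]
  · rw [PySem.List.foldl_append_eq_flatMap]
    simp
  · intro acc i _
    simp only [pvStepB]
    split
    · rw [PySem.List.foldl_append_singleton_eq_map]
    · rfl

theorem pv_level_eq (m : Int) (table : PySem.Dict Int (List (List Int))) (hm : m ≠ 0)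
    (ht : ∀ i ∈ PySem.List.pyRange m 0 (-2), table.getD (m - i) [] = get_sums_of_odds (m - i)) :
    pvLevel m table = get_sums_of_odds m := by
  rw [pv_level_flatMap, pv_A_flatMap m hm]
  refine List.flatMap_congr fun i hi => ?_
  simp only [pvStepB, pvStepA, ht i hi]
  split
  · exact List.map_congr_left fun k hk => pv_insert_sorted i (pv_mem_A_pairwise hk)
  · rfl

-- the table invariant: correct for every even key below b
def pvGood (t : PySem.Dict Int (List (List Int))) (b : Int) : Prop :=
  ∀ j : Int, 0 ≤ j → j < b → 2 ∣ j → t.getD j [] = get_sums_of_odds j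

theorem pv_step_good {t : PySem.Dict Int (List (List Int))} {m : Int}
    (hg : pvGood t m) (hm2 : 2 ≤ m) (hme : 2 ∣ m) :
    pvGood (t.insert m (pvLevel m t)) (m + 2) := by
  have hlev : pvLevel m t = get_sums_of_odds m := by
    refine pv_level_eq m t (by omega) fun i hi => ?_
    obtain ⟨h1, h2, h3⟩ := pv_mem_pyRange_neg_two hi
    exact hg (m - i) (by omega) (by omega) h3
  intro j hj0 hjb hje
  by_cases hjm : j = m
  · subst hjm
    rw [PySem.Dict.getD_insert_self]
    exact hlev
  · rw [PySem.Dict.getD_insert_of_ne _ _ _ hjm]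
    exact hg j hj0 (by omega) hje

theorem pv_pyRange_two (b : Int) :
    PySem.List.pyRange 2 b 2 = (List.range ((b - 1) / 2).toNat).map (fun k : Nat => 2 + 2 * (k : Int)) := by
  simp only [PySem.List.pyRange]
  norm_num
  split
  · congr 2
  · have h : ((b - 1) / 2).toNat = 0 := by omega
    rw [h]

def pvT (c : Nat) : PySem.Dict Int (List (List Int)) :=
  ((List.range c).map (fun k : Nat => 2 + 2 * (k : Int))).foldl
    (fun t m => t.insert m (pvLevel m t)) (PySem.Dict.insert PySem.Dict.empty 0 [])

theorem pv_T_good : ∀ c : Nat, pvGood (pvT c) (2 * (c : Int) + 2) := by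
  intro c
  induction c with
  | zero =>
    intro j hj0 hjb _
    have hj : j = 0 := by omega
    subst hj
    rw [pvT]
    simp only [List.range_zero, List.map_nil, List.foldl_nil]
    rw [PySem.Dict.getD_insert_self, get_sums_of_odds]
    simp
  | succ c ih =>
    have hT : pvT (c + 1) = (pvT c).insert (2 + 2 * (c : Int)) (pvLevel (2 + 2 * (c : Int)) (pvT c)) := by
      rw [pvT, List.range_succ, List.map_append, List.foldl_append]
      rfl
    rw [hT]
    have := pv_step_good (m := 2 + 2 * (c : Int)) (by simpa [pvGood, add_comm] using ih)
      (by omega) (by omega)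
    intro j hj0 hjb hje
    exact this j hj0 (by omega) hje

-- ===== VERDICT (by name: the statement is the Claim_ definition above) =====
theorem get_sums_of_odds_spec : Claim_equal_get_sums_of_odds := by
  intro n _
  unfold Spec_get_sums_of_odds
  by_cases hn : n ≤ 0
  · rw [get_sums_of_odds_alt, if_pos hn]
    by_cases h0 : n = 0
    · rw [get_sums_of_odds, if_pos h0]
    · rw [pv_A_flatMap n h0, pv_pyRange_nonpos hn]
      rfl
  · rw [get_sums_of_odds_alt, if_neg hn]
    have hfold : (PySem.List.pyRange 2 n 2).foldl
        (fun t m => t.insert m (pvLevel m t)) (PySem.Dict.insert PySem.Dict.empty 0 [])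
        = pvT ((n - 1) / 2).toNat := by
      rw [pv_pyRange_two, pvT]
    simp only [hfold]
    have hgood := pv_T_good ((n - 1) / 2).toNat
    refine (pv_level_eq n _ (by omega) fun i hi => ?_).symm
    obtain ⟨h1, h2, h3⟩ := pv_mem_pyRange_neg_two hi
    exact hgood (n - i) (by omega) (by omega) h3
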